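-- pv_equiv track=rewrite | github.com/HomseyFT/ECC-Encrption | field.py | t_s_recursive
-- ===== SOURCE A (Python) =====
-- def t_s_recursive(a: int, p: int, k: int, b: int, b_inverse: int) -> int:
--     m = (p - 1) >> k
--     a_m = 1
--     while m % 2 == 0 and a_m == 1:
--         m >>= 1
--         k += 1
--         a_m = pow(a, m, p)
--
--     if a_m == p - 1:
--         b_power = 1 << (k - 1)
--         b_power_half = 1 << (k - 2)
--         a_next = (a * pow(b, b_power, p)) % p
--         a_next_root = t_s_recursive(a_next, p, k, b, b_inverse)
--         a_root = a_next_root * pow(b_inverse, b_power_half, p)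
--         return a_root % p
--     return pow(a, (m + 1) >> 1, p)
-- ===== SOURCE B (Python) =====
-- def _reduce(a, p, e, j):
--     # strip factors of 2 from e while a^e stays 1; early return on the first
--     # power that is not 1 (if the loop ends with e odd, every power seen was 1)
--     while e & 1 == 0:
--         e >>= 1
--         j += 1
--         v = pow(a, e, p)
--         if v != 1:
--             return e, j, v
--     return e, j, 1
--
--
-- def t_s_recursive(a: int, p: int, k: int, b: int, b_inverse: int) -> int:
--     # Two-phase iterative version: phase 1 walks forward recording, in a list, the
--     # k at which each correction is due (updating a as it goes); phase 2 computes
--     # the base root and multiplies the corrections back in, in reverse order,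
--     # reproducing exactly the products the recursion forms on the way back out.
--     corrections = []
--     while True:
--         e, k, w = _reduce(a, p, (p - 1) >> k, k)
--         if w != p - 1:
--             break
--         corrections.append(k)
--         a = a * pow(b, 2 ** (k - 1), p) % p
--     root = pow(a, (e + 1) >> 1, p)
--     for j in reversed(corrections):
--         root = root * pow(b_inverse, 2 ** (j - 2), p) % p
--     return root
-- ===== Notes on version B (the rewrite author's own statement) =====
-- stated objective: alternative
-- what changed: A's recursion (which multiplies pow(b_inverse, 1<<(k-2), p) onto the result on the way back out) is replaced by a two-phase iteration: a forward loop records the correction exponents k in a list while updating a, then the base root is computed and a backward loop over the reversed list multiplies the corrections in mod p; the inner loop is also restructured to test only 'm even' and return early on the first power that is not 1.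
-- outside the precondition, e.g. on t_s_recursive(3, 7, 0, 2, 4): A raises ValueError, B raises TypeError; on t_s_recursive(-1709696035, -37, 1, 1, -697086885): A returns -31, B returns -31
import Mathlib
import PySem

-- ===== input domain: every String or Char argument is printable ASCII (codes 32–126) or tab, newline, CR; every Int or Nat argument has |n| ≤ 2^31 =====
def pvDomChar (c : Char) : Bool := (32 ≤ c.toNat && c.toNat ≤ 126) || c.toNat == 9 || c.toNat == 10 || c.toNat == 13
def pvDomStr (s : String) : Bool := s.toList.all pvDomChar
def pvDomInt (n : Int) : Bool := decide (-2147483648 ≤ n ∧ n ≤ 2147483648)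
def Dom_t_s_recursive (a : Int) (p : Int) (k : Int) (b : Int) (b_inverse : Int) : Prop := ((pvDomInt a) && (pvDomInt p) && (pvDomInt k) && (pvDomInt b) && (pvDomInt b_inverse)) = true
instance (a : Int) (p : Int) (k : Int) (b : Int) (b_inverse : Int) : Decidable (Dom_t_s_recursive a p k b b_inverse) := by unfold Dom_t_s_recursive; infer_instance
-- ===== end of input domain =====

-- B replaces A's recursion by a two-phase iteration: a forward pass records the correction
-- exponents in a list, a backward fold multiplies them in; equal return values proved on Pre_.

-- ===== PORT A =====
-- Port of Python's built-in three-argument pow(x, e, p) (used by both Pythons), as binary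
-- exponentiation reducing with Python's floor-mod at every step — the same value as
-- PySem.Int.powMod x e p for p ≠ 0, but evaluable for the 2^30-scale exponents this function
-- feeds pow with (powMod's definition computes the full power x^e first, not feasible there).
def pmod (x : Int) (e : Nat) (p : Int) : Int :=
  if e = 0 then PySem.Int.mod 1 p
  else
    let h := pmod x (e / 2) p
    if e % 2 = 0 then PySem.Int.mod (h * h) p else PySem.Int.mod (h * h * x) p
termination_by e
decreasing_by omega

-- the inner while loop of A:  while m % 2 == 0 and a_m == 1: m >>= 1; k += 1; a_m = pow(a, m, p)
-- fuel 64 is a totality guard only: under Dom the loop runs ≤ 32 iterations (m halves, |m| < 2^32)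
def tsLoopA (a : Int) (p : Int) : Nat → Int → Int → Int → Int × Int × Int
  | 0, m, k, a_m => (m, k, a_m)
  | fuel + 1, m, k, a_m =>
    if PySem.Int.mod m 2 = 0 ∧ a_m = 1 then
      let m' := m >>> (1 : Nat)
      -- exponent m'.toNat: exact for the nonnegative exponents reachable under Pre_ (Python pow
      -- raises or inverts on a negative exponent; such inputs are outside Pre_)
      tsLoopA a p fuel m' (k + 1) (pmod a m'.toNat p)
    else (m, k, a_m)

-- the recursion of A; fuel 64 is a totality guard only (recursion depth ≤ 32 under Dom ∧ Pre_),
-- its base value PySem.Int.mod 1 p is arbitrary (never reached on Pre_);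
-- k.toNat in the shifts is exact for the nonnegative k reachable under Pre_ (Python raises on k < 0)
def tsRecA (p : Int) (b : Int) (b_inverse : Int) : Nat → Int → Int → Int
  | 0, _, _ => PySem.Int.mod 1 p
  | fuel + 1, a, k =>
    let t := tsLoopA a p 64 ((p - 1) >>> k.toNat) k 1
    let m := t.1
    let k' := t.2.1
    let a_m := t.2.2
    if a_m = p - 1 then
      let b_power := (1 : Int) <<< (k' - 1).toNat
      let b_power_half := (1 : Int) <<< (k' - 2).toNat
      let a_next := PySem.Int.mod (a * pmod b b_power.toNat p) p
      let a_next_root := tsRecA p b b_inverse fuel a_next k'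
      let a_root := a_next_root * pmod b_inverse b_power_half.toNat p
      PySem.Int.mod a_root p
    else
      pmod a ((m + 1) >>> (1 : Nat)).toNat p

def t_s_recursive (a : Int) (p : Int) (k : Int) (b : Int) (b_inverse : Int) : Int :=
  tsRecA p b b_inverse 64 a k

-- ===== PORT B =====
-- B's _reduce: a different inner loop — it tests only 'e & 1 == 0', computes the power once
-- into v and RETURNS EARLY when v ≠ 1; when the loop falls through with e odd every power seen
-- was 1, so the returned third component is 1.  Fuel 64 is the same totality guard as in A.
def tsReduce (a : Int) (p : Int) : Nat → Int → Int → Int × Int × Int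
  | 0, e, j => (e, j, 1)
  | fuel + 1, e, j =>
    if PySem.Int.band e 1 = 0 then
      let e' := e >>> (1 : Nat)
      -- exponent e'.toNat: exact for the nonnegative exponents reachable under Pre_ (Python pow
      -- raises or inverts on a negative exponent; such inputs are outside Pre_)
      let v := pmod a e'.toNat p
      if v = 1 then tsReduce a p fuel e' (j + 1) else (e', j + 1, v)
    else (e, j, 1)

-- B's phase 1: the 'while True' loop; cs is the Python list 'corrections' (appended at the back);
-- the result carries (corrections, final a, final e).  Fuel 64 = totality guard, unreached on Pre_.
-- Exponent (j' - 1).toNat: exact for the j' ≥ 1 reachable under Pre_ (Python's 2 ** of a negative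
-- value leaves the int domain; such inputs are outside Pre_).
def tsPhase1 (p : Int) (b : Int) : Nat → Int → Int → List Int → List Int × Int × Int
  | 0, x, _, cs => (cs, x, 0)
  | fuel + 1, x, j, cs =>
    match tsReduce x p 64 ((p - 1) >>> j.toNat) j with
    | (e, j', w) =>
      if w = p - 1 then
        tsPhase1 p b fuel (PySem.Int.mod (x * pmod b ((2 : Int) ^ (j' - 1).toNat).toNat p) p) j'
          (cs ++ [j'])
      else (cs, x, e)

-- B's phase 2: 'root = pow(a, (e+1)>>1, p); for j in reversed(corrections): root = root * pow(b_inverse, 2**(j-2), p) % p'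
def t_s_recursive_alt (a : Int) (p : Int) (k : Int) (b : Int) (b_inverse : Int) : Int :=
  match tsPhase1 p b 64 a k [] with
  | (cs, x, e) =>
    cs.reverse.foldl
      (fun root j => PySem.Int.mod (root * pmod b_inverse ((2 : Int) ^ (j - 2).toNat).toNat p) p)
      (pmod x ((e + 1) >>> (1 : Nat)).toNat p)

-- ===== PRECONDITION & SPEC =====
-- Pre_ is where Python A returns normally. First disjunct: the function's natural Tonelli–Shanks
-- domain (modulus p ≥ 3, shift position 1 ≤ k < bitlen(p-1), so m = (p-1) >> k stays ≥ 1).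
-- Second disjunct: the k = 0 calls that return — excluded from them are exactly those where
-- a^((p-1)>>1) ≡ p-1 (mod p) (Euler's criterion side condition, stated via the fast-pow helper
-- pmod only so that the instance below can decide it; it is a condition on a, p alone, not a
-- re-run of the algorithm), on which the inner loop stops at k = 1 and '1 << (k - 2)' raises.
-- Third disjunct: negative moduli on which the shifted exponent is already -1, where A returns
-- 1 % p without ever raising a negative power. Everywhere else Python A diverges (m reaches 0 and
-- the inner loop never exits), hits Python's recursion limit (p = 1), or raises (p = 0 or 2,
-- negative k shift, '1 << (k-2)' with k < 2, or a non-invertible negative-exponent pow); the one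
-- exception, also excluded: p < 0 with a negative exponent that pow can invert — outside the
-- function's purpose (a negative modulus), and Python's negative-exponent modular pow has no
-- PySem counterpart to port.
def Pre_t_s_recursive (a : Int) (p : Int) (k : Int) (b : Int) (b_inverse : Int) : Prop :=
  (3 ≤ p ∧ 1 ≤ k ∧ k < (PySem.Int.bitLength (p - 1) : Int))
  ∨ (3 ≤ p ∧ k = 0 ∧ (PySem.Int.mod p 2 = 0 ∨ pmod a ((p - 1) >>> (1 : Nat)).toNat p ≠ p - 1))
  ∨ (p < 0 ∧ 0 ≤ k ∧ (p - 1) >>> k.toNat = -1)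
instance (a : Int) (p : Int) (k : Int) (b : Int) (b_inverse : Int) : Decidable (Pre_t_s_recursive a p k b b_inverse) := by unfold Pre_t_s_recursive; infer_instance

def pvWitness_t_s_recursive : Int × Int × Int × Int × Int := (2, 17, 1, 3, 6)

def Spec_t_s_recursive (a : Int) (p : Int) (k : Int) (b : Int) (b_inverse : Int) (out : Int) : Prop := out = t_s_recursive_alt a p k b b_inverse
instance (a : Int) (p : Int) (k : Int) (b : Int) (b_inverse : Int) (out : Int) : Decidable (Spec_t_s_recursive a p k b b_inverse out) := by unfold Spec_t_s_recursive; infer_instance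

-- ===== CLAIM (what is proved, stated in full; the proofs are below) =====
def Claim_equal_t_s_recursive : Prop := ∀ (a : Int) (p : Int) (k : Int) (b : Int) (b_inverse : Int), Dom_t_s_recursive a p k b b_inverse → Pre_t_s_recursive a p k b b_inverse → Spec_t_s_recursive a p k b b_inverse (t_s_recursive a p k b b_inverse)

-- ===== LEMMAS AND PROOFS =====

-- Python's 1 << n is 2 ** n: bridges A's shifts to B's powers
theorem one_shiftLeft_eq_two_pow (n : Nat) : (1 : Int) <<< n = 2 ^ n := by
  rw [← Int.shiftLeft_natCast_right, Int.shiftLeft_eq_mul_pow]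
  push_cast
  ring

-- tsLoopA returns immediately when a_m ≠ 1
theorem tsLoopA_of_ne (a p : Int) (fuel : Nat) (m k a_m : Int) (h : a_m ≠ 1) :
    tsLoopA a p fuel m k a_m = (m, k, a_m) := by
  cases fuel with
  | zero => rfl
  | succ n => simp only [tsLoopA]; rw [if_neg]; rintro ⟨_, h1⟩; exact h h1

-- started at a_m = 1, A's inner loop computes exactly what B's early-return _reduce computes
theorem tsReduce_eq_tsLoopA (a p : Int) : ∀ (fuel : Nat) (m k : Int),
    tsReduce a p fuel m k = tsLoopA a p fuel m k 1 := by
  intro fuel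
  induction fuel with
  | zero => intro m k; rfl
  | succ n ih =>
    intro m k
    simp only [tsReduce, tsLoopA, and_true, PySem.Int.band_one]
    by_cases hm : PySem.Int.mod m 2 = 0
    · rw [if_pos hm, if_pos hm]
      by_cases hv : pmod a (m >>> (1:Nat)).toNat p = 1
      · rw [if_pos hv, hv]; exact ih _ _
      · rw [if_neg hv, tsLoopA_of_ne a p n _ _ _ hv]
    · rw [if_neg hm, if_neg hm]

-- phase 1 only ever appends to the accumulated list
theorem tsPhase1_append (p b : Int) : ∀ (fuel : Nat) (a k : Int) (cs : List Int),
    tsPhase1 p b fuel a k cs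
      = (cs ++ (tsPhase1 p b fuel a k []).1, (tsPhase1 p b fuel a k []).2) := by
  intro fuel
  induction fuel with
  | zero => intro a k cs; simp [tsPhase1]
  | succ n ih =>
    intro a k cs
    simp only [tsPhase1]
    split
    · rw [ih _ _ (cs ++ _), ih _ _ ([] ++ _)]
      simp
    · simp

-- the key invariant: folding B's corrections (in reverse) onto B's base root gives A's recursion
theorem fold_tsPhase1_eq_tsRecA (p b b_inverse : Int) : ∀ (fuel : Nat) (a k : Int),
    (tsPhase1 p b fuel a k []).1.reverse.foldl
        (fun r kk => PySem.Int.mod (r * pmod b_inverse ((2 : Int) ^ (kk - 2).toNat).toNat p) p)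
        (pmod (tsPhase1 p b fuel a k []).2.1
          (((tsPhase1 p b fuel a k []).2.2 + 1) >>> (1 : Nat)).toNat p)
      = tsRecA p b b_inverse fuel a k := by
  intro fuel
  induction fuel with
  | zero =>
    intro a k
    show pmod a (((0:Int) + 1) >>> (1 : Nat)).toNat p = PySem.Int.mod 1 p
    rw [show (((0:Int) + 1) >>> (1 : Nat)).toNat = 0 by decide, pmod]
    simp
  | succ n ih =>
    intro a k
    simp only [tsPhase1, tsRecA, tsReduce_eq_tsLoopA]
    split
    · rw [tsPhase1_append]
      simp only [List.reverse_cons, List.nil_append, List.singleton_append,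
        List.foldl_cons, List.foldl_append, List.foldl_nil]
      rw [ih]
      simp only [one_shiftLeft_eq_two_pow]
    · simp

-- ===== VERDICT (by name: the statement is the Claim_ definition above) =====
theorem t_s_recursive_spec : Claim_equal_t_s_recursive := by
  intro a p k b b_inverse _ _
  unfold Spec_t_s_recursive t_s_recursive t_s_recursive_alt
  exact (fold_tsPhase1_eq_tsRecA p b b_inverse 64 a k).symm
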